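-- pv_equiv track=rewrite | github.com/cortes-ciriano-lab/SComatic | scripts/BaseCellCalling/BaseCellCalling.step1.py | homopolymer_function
-- ===== SOURCE A (Python) =====
-- def longestRun(s):
-- 	if len(s) == 0: return 0
-- 	runs = ''.join('*' if x == y else ' ' for x,y in zip(s,s[1:]))
-- 	starStrings = runs.split()
-- 	if len(starStrings) == 0: return 1
-- 	return 1 + max(len(stars) for stars in starStrings)
--
-- def homopolymer_function(A,alts,stream_direction):
-- 	# A is the up or down-stream sequence
-- 	if (A != '.'):
--
-- 		# Get the longest k-mer including the alt base
-- 		if (stream_direction == 'upstream'):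
-- 			Max_seq_l = max([longestRun(A+x) for x in alts])
-- 		elif (stream_direction == 'downstream'):
-- 			Max_seq_l = max([longestRun(x+A) for x in alts])
--
-- 		# If the longest homo-kmer (including the alternative allele) is longer than 4, filter this site
-- 		if (Max_seq_l >= 4):
-- 			FILTER = 1
-- 		else:
-- 			FILTER = 0
-- 	else:
-- 		FILTER = 0
--
-- 	return(FILTER)
-- ===== SOURCE B (Python) =====
-- def homopolymer_function(A, alts, stream_direction):
--     # A is the up or down-stream sequence
--     if A == '.':
--         return 0
--     if stream_direction == 'upstream':
--         seqs = [A + x for x in alts]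
--     elif stream_direction == 'downstream':
--         seqs = [x + A for x in alts]
--     for s in seqs:
--         best = run = 0
--         prev = None
--         for c in s:
--             run = run + 1 if c == prev else 1
--             prev = c
--             if run > best:
--                 best = run
--         if best >= 4:
--             return 1
--     return 0
-- ===== Notes on version B (the rewrite author's own statement) =====
-- stated objective: simpler
-- what changed: longestRun's marker-string + split() + max-over-groups trick is replaced by a single linear scan tracking the current run length and running maximum, and the per-alt list comprehension + max() is replaced by an early-exit loop over the alts.
import Mathlib
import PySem

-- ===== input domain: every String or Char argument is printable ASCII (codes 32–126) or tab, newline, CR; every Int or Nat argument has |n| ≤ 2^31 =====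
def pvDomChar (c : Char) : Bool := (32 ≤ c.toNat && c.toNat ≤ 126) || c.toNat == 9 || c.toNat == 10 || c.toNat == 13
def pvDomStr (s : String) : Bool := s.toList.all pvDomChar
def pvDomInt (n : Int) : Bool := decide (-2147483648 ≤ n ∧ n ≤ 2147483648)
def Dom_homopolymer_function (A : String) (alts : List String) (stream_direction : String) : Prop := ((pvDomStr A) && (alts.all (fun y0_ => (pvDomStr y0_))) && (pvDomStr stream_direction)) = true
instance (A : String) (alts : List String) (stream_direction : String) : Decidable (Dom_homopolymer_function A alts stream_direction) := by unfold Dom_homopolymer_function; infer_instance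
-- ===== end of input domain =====

-- B replaces longestRun's marker-string/split() trick by a single linear scan and the
-- per-alt list + max() by an early-exit loop; same 0/1 result on all inputs where A returns.


-- ===== PORT A =====
-- longestRun: marker string of '*'/' ' for equal adjacent pairs, split on whitespace, 1 + max group length
def longestRunA (s : List Char) : Int :=
  if s.length = 0 then 0
  else
    let runs := (s.zip s.tail).map (fun p => if p.1 = p.2 then '*' else ' ')
    let starStrings := PySem.Chars.split₀ runs
    if starStrings.length = 0 then 1
    else
      -- max(gen) over a nonempty list; .getD 0 is never the value taken in that branch
      1 + ((PySem.List.max? (starStrings.map (fun stars => (stars.length : Int))) (fun y => y)).getD 0)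

def homopolymer_function (A : String) (alts : List String) (stream_direction : String) : Int :=
  if A ≠ "." then
    let Max_seq_l : Int :=
      if stream_direction = "upstream" then
        -- max([...]); on alts = [] Python raises ValueError (excluded by Pre_), .getD 0 is never taken
        (PySem.List.max? (alts.map (fun x => longestRunA (A.toList ++ x.toList))) (fun y => y)).getD 0
      else if stream_direction = "downstream" then
        (PySem.List.max? (alts.map (fun x => longestRunA (x.toList ++ A.toList))) (fun y => y)).getD 0
      else 0  -- Python raises NameError here (Max_seq_l unbound); excluded by Pre_
    if Max_seq_l ≥ 4 then 1 else 0
  else 0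

-- ===== PORT B =====
-- linear scan: state (best, run, prev); stepB is the body of B's inner for-loop
def stepB (st : Int × Int × Option Char) (c : Char) : Int × Int × Option Char :=
  let run := if some c = st.2.2 then st.2.1 + 1 else 1
  (if run > st.1 then run else st.1, run, some c)

def longestRunB (s : List Char) : Int :=
  (s.foldl stepB (0, 0, none)).1

-- the early-exit 'for s in seqs' loop of B
def goSeqsB : List (List Char) → Int
  | [] => 0
  | s :: rest => if longestRunB s ≥ 4 then 1 else goSeqsB rest

def homopolymer_function_alt (A : String) (alts : List String) (stream_direction : String) : Int :=
  if A = "." then 0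
  else
    let seqs :=
      if stream_direction = "upstream" then alts.map (fun x => A.toList ++ x.toList)
      else if stream_direction = "downstream" then alts.map (fun x => x.toList ++ A.toList)
      else []  -- Python: seqs unbound, the loop raises NameError; excluded by Pre_
    goSeqsB seqs

-- ===== PRECONDITION & SPEC =====
-- Pre_ excludes exactly the inputs where A raises: alts = [] (ValueError from max([])) or a
-- stream_direction other than 'upstream'/'downstream' (NameError), both only reachable when A ≠ ".".
def Pre_homopolymer_function (A : String) (alts : List String) (stream_direction : String) : Prop :=
  A = "." ∨ (alts ≠ [] ∧ (stream_direction = "upstream" ∨ stream_direction = "downstream"))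
instance (A : String) (alts : List String) (stream_direction : String) : Decidable (Pre_homopolymer_function A alts stream_direction) := by unfold Pre_homopolymer_function; infer_instance
def pvWitness_homopolymer_function : String × List String × String := ("AC", ["C"], "upstream")

def Spec_homopolymer_function (A : String) (alts : List String) (stream_direction : String) (out : Int) : Prop := out = homopolymer_function_alt A alts stream_direction
instance (A : String) (alts : List String) (stream_direction : String) (out : Int) : Decidable (Spec_homopolymer_function A alts stream_direction out) := by unfold Spec_homopolymer_function; infer_instance

-- ===== CLAIM (what is proved, stated in full; the proofs are below) =====
def Claim_equal_homopolymer_function : Prop := ∀ (A : String) (alts : List String) (stream_direction : String), Dom_homopolymer_function A alts stream_direction → Pre_homopolymer_function A alts stream_direction → Spec_homopolymer_function A alts stream_direction (homopolymer_function A alts stream_direction)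
-- ===== LEMMAS AND PROOFS =====

-- (leading-run length, max-run length) of the sequence a :: t, both ≥ 1
def lrP (a : Char) : List Char → Int × Int
  | [] => (1, 1)
  | b :: t =>
      let p := lrP b t
      if a = b then (p.1 + 1, max (p.1 + 1) p.2) else (1, max 1 p.2)

-- the marker list A builds from a :: t
def markersP (a : Char) : List Char → List Char
  | [] => []
  | b :: t => (if a = b then '*' else ' ') :: markersP b t

-- (leading '*'-run length, max '*'-run length) of a marker list
def srP : List Char → Int × Int
  | [] => (0, 0)
  | c :: t =>
      let p := srP t
      if c = '*' then (p.1 + 1, max (p.1 + 1) p.2) else (0, p.2)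

def listMaxI : List Int → Int
  | [] => 0
  | x :: t => max x (listMaxI t)

-- running max over the rest of the list, given the previous char a whose current run is run
def contB (a : Char) (run : Int) : List Char → Int
  | [] => run
  | b :: t =>
      let run' := if b = a then run + 1 else 1
      max run' (contB b run' t)

lemma lrP_pos (a : Char) (t : List Char) : 1 ≤ (lrP a t).1 ∧ (lrP a t).1 ≤ (lrP a t).2 ∧ 1 ≤ (lrP a t).2 := by
  induction t generalizing a with
  | nil => simp [lrP]
  | cons b t ih =>
      have h := ih b
      simp only [lrP]
      split <;> simp <;> try omega

lemma srP_bounds (rs : List Char) : 0 ≤ (srP rs).1 ∧ (srP rs).1 ≤ (srP rs).2 ∧ 0 ≤ (srP rs).2 := by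
  induction rs with
  | nil => simp [srP]
  | cons c t ih =>
      simp only [srP]
      split <;> simp <;> try omega

lemma markersP_srP (a : Char) (t : List Char) :
    srP (markersP a t) = ((lrP a t).1 - 1, (lrP a t).2 - 1) := by
  induction t generalizing a with
  | nil => simp [markersP, srP, lrP]
  | cons b t ih =>
      have hb := lrP_pos b t
      simp only [markersP, lrP, srP]
      by_cases h : a = b
      · simp only [if_pos h, ih b]
        simp
        omega
      · simp only [if_neg h, ih b]
        have : (' ' = '*') = False := by simp
        simp only [this, if_false]
        simp
        omega

lemma markersP_eq_zip (a : Char) (t : List Char) :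
    ((a :: t).zip t).map (fun p => if p.1 = p.2 then '*' else ' ') = markersP a t := by
  induction t generalizing a with
  | nil => simp [markersP]
  | cons b t ih => simp [markersP, ih b]

lemma markersP_star_space (a : Char) (t : List Char) :
    ∀ c ∈ markersP a t, c = '*' ∨ c = ' ' := by
  induction t generalizing a with
  | nil => simp [markersP]
  | cons b t ih =>
      intro c hc
      simp only [markersP, List.mem_cons] at hc
      rcases hc with h | h
      · subst h; split
        · exact Or.inl rfl
        · exact Or.inr rfl
      · exact ih b c h

lemma listMaxI_nonneg (l : List Int) : 0 ≤ listMaxI l := by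
  induction l with
  | nil => simp [listMaxI]
  | cons x t ih => simp only [listMaxI]; omega

lemma listMaxI_append (l m : List Int) : listMaxI (l ++ m) = max (listMaxI l) (listMaxI m) := by
  induction l with
  | nil =>
      have := listMaxI_nonneg m
      simp only [List.nil_append, listMaxI]
      omega
  | cons x t ih =>
      simp only [List.cons_append, listMaxI, ih]
      omega

lemma listMaxI_reverse (l : List Int) : listMaxI l.reverse = listMaxI l := by
  induction l with
  | nil => rfl
  | cons x t ih =>
      simp only [List.reverse_cons, listMaxI_append, ih, listMaxI]
      have := listMaxI_nonneg t
      omega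

lemma foldl_max_eq (vs : List Int) (v : Int) (hv : 0 ≤ v) :
    vs.foldl max v = max v (listMaxI vs) := by
  induction vs generalizing v with
  | nil => simp [listMaxI]; omega
  | cons x t ih =>
      simp only [List.foldl, listMaxI]
      rw [ih (max v x) (by omega)]
      omega

lemma split₀_go_max (rs : List Char) : ∀ (cur : List Char) (acc : List (List Char)),
    (∀ c ∈ rs, c = '*' ∨ c = ' ') →
    listMaxI ((PySem.Chars.split₀.go rs cur acc).map (fun g => (g.length : Int))) =
      max (listMaxI (acc.map (fun g => (g.length : Int))))
          (max ((cur.length : Int) + (srP rs).1) ((srP rs).2)) := by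
  induction rs with
  | nil =>
      intro cur acc _
      have hacc := listMaxI_nonneg (acc.map (fun g => (g.length : Int)))
      by_cases h : cur = []
      · subst h
        simp only [PySem.Chars.split₀.go, List.isEmpty_nil, if_pos, srP,
          List.map_reverse, listMaxI_reverse]
        simp
        omega
      · have hne : cur.isEmpty = false := by simpa [List.isEmpty_iff] using h
        simp only [PySem.Chars.split₀.go, hne, Bool.false_eq_true, if_false, srP,
          List.map_reverse, listMaxI_reverse, List.map_cons, listMaxI, List.length_reverse]
        omega
  | cons c rest ih =>
      intro cur acc hcs
      have hrest : ∀ x ∈ rest, x = '*' ∨ x = ' ' := fun x hx => hcs x (List.mem_cons_of_mem _ hx)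
      have hsr := srP_bounds rest
      have hacc := listMaxI_nonneg (acc.map (fun g => (g.length : Int)))
      rcases hcs c List.mem_cons_self with rfl | rfl
      · -- c = '*' : not whitespace, extend cur
        have hsp : PySem.Chars.isspace '*' = false := by decide
        simp only [PySem.Chars.split₀.go, hsp, Bool.false_eq_true, if_false]
        rw [ih ('*' :: cur) acc hrest]
        simp only [srP, List.length_cons]
        have h1 : ('*' = '*') = True := by simp
        simp only [if_true]
        push_cast
        omega
      · -- c = ' ' : whitespace, flush cur
        have hsp : PySem.Chars.isspace ' ' = true := by decide
        have h2 : (' ' = '*') = False := by simp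
        simp only [PySem.Chars.split₀.go, hsp, if_true, srP, h2, if_false]
        by_cases h : cur = []
        · subst h
          simp only [List.isEmpty_nil, if_pos]
          rw [ih [] acc hrest]
          simp
          omega
        · have hne : cur.isEmpty = false := by simpa [List.isEmpty_iff] using h
          simp only [hne, Bool.false_eq_true, if_false]
          rw [ih [] (cur.reverse :: acc) hrest]
          simp only [List.map_cons, listMaxI, List.length_reverse, List.length_nil]
          push_cast
          omega

lemma longestRunA_cons (a : Char) (t : List Char) :
    longestRunA (a :: t) = (lrP a t).2 := by
  have hs' := markersP_srP a t
  have hs1 : (srP (markersP a t)).1 = (lrP a t).1 - 1 := by rw [hs']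
  have hs2 : (srP (markersP a t)).2 = (lrP a t).2 - 1 := by rw [hs']
  have hgo := split₀_go_max (markersP a t) [] [] (markersP_star_space a t)
  have hlr := lrP_pos a t
  have hsr := srP_bounds (markersP a t)
  simp only [List.map_nil, listMaxI, List.length_nil, Nat.cast_zero, zero_add] at hgo
  simp only [longestRunA, List.length_cons, List.tail_cons, markersP_eq_zip,
    PySem.Chars.split₀]
  have hnz : ¬ (t.length + 1 = 0) := by omega
  rw [if_neg hnz]
  rcases hgroups : PySem.Chars.split₀.go (markersP a t) [] [] with _ | ⟨g, gs⟩
  · rw [hgroups] at hgo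
    simp only [List.map_nil, listMaxI] at hgo
    simp only [List.length_nil, if_pos]
    omega
  · rw [hgroups] at hgo
    simp only [List.map_cons, listMaxI] at hgo
    simp only [List.length_cons, List.map_cons]
    rw [if_neg (by omega : ¬ ((gs.length + 1 : Nat) = 0)), PySem.List.max?_id_cons]
    simp only [Option.getD_some]
    rw [foldl_max_eq _ _ (by positivity)]
    omega

lemma foldB_inv (t : List Char) : ∀ (best run : Int) (a : Char), run ≤ best →
    (t.foldl stepB (best, run, some a)).1 = max best (contB a run t) := by
  induction t with
  | nil => intro best run a h; simp [contB]; omega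
  | cons b t ih =>
      intro best run a h
      by_cases hb : b = a
      · subst hb
        simp only [List.foldl, stepB, contB]
        rw [ih _ _ _ (by split <;> omega)]
        generalize contB b (run + 1) t = C
        split <;> omega
      · have hc : ¬ (some b = some a) := by simp [hb]
        simp only [List.foldl, stepB, contB, if_neg hc, if_neg hb]
        rw [ih _ _ _ (by split <;> omega)]
        generalize contB b 1 t = C
        split <;> omega

lemma contB_lrP (t : List Char) : ∀ (a : Char) (run : Int), 1 ≤ run →
    max run (contB a run t) = max ((lrP a t).1 + run - 1) ((lrP a t).2) := by
  induction t with
  | nil => intro a run h; simp [contB, lrP]; omega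
  | cons b t ih =>
      intro a run h
      by_cases hb : b = a
      · subst hb
        simp [contB, lrP]
        have ih1 := ih b (run + 1) (by omega)
        have hp := lrP_pos b t
        omega
      · simp only [contB, lrP, if_neg hb, if_neg (Ne.symm hb)]
        have ih1 := ih b 1 (by omega)
        have hp := lrP_pos b t
        omega

lemma longestRunB_cons (a : Char) (t : List Char) :
    longestRunB (a :: t) = (lrP a t).2 := by
  have h0 : stepB (0, 0, none) a = (1, 1, some a) := by simp [stepB]
  have h1 : longestRunB (a :: t) = (t.foldl stepB (1, 1, some a)).1 := by
    simp only [longestRunB, List.foldl, h0]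
  rw [h1, foldB_inv t 1 1 a le_rfl]
  have h2 := contB_lrP t a 1 le_rfl
  have hb := lrP_pos a t
  omega

lemma longestRun_eq (s : List Char) : longestRunA s = longestRunB s := by
  cases s with
  | nil => simp [longestRunA, longestRunB]
  | cons a t => rw [longestRunA_cons, longestRunB_cons]

lemma goSeqsB_eq (seqs : List (List Char)) :
    goSeqsB seqs = if seqs.any (fun s => decide (4 ≤ longestRunB s)) then 1 else 0 := by
  induction seqs with
  | nil => simp [goSeqsB]
  | cons s rest ih =>
      simp only [goSeqsB, List.any_cons, ih]
      by_cases h : 4 ≤ longestRunB s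
      · simp [h, ge_iff_le]
      · simp [h, ge_iff_le]

lemma foldl_max_ge_iff (vs : List Int) (v : Int) :
    4 ≤ vs.foldl max v ↔ 4 ≤ v ∨ ∃ u ∈ vs, 4 ≤ u := by
  induction vs generalizing v with
  | nil => simp
  | cons x t ih =>
      simp only [List.foldl, ih, List.mem_cons]
      constructor
      · rintro (h | ⟨u, hu, h4⟩)
        · rcases le_max_iff.mp h with h | h
          · exact Or.inl h
          · exact Or.inr ⟨x, Or.inl rfl, h⟩
        · exact Or.inr ⟨u, Or.inr hu, h4⟩
      · rintro (h | ⟨u, hu | hu, h4⟩)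
        · exact Or.inl (le_max_of_le_left h)
        · exact Or.inl (le_max_of_le_right (hu ▸ h4))
        · exact Or.inr ⟨u, hu, h4⟩

lemma max_ite_eq {α : Type} (f : α → Int) (y : α) (ys : List α) :
    (if 4 ≤ (ys.map f).foldl max (f y) then (1 : Int) else 0) =
    (if (y :: ys).any (fun x => decide (4 ≤ f x)) then 1 else 0) := by
  by_cases h : 4 ≤ (ys.map f).foldl max (f y)
  · rw [if_pos h]
    have hany : (y :: ys).any (fun x => decide (4 ≤ f x)) = true := by
      rcases (foldl_max_ge_iff _ _).mp h with h4 | ⟨u, hu, h4⟩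
      · simp only [List.any_eq_true, List.mem_cons, decide_eq_true_eq]
        exact ⟨y, Or.inl rfl, h4⟩
      · rcases List.mem_map.mp hu with ⟨x, hx, rfl⟩
        simp only [List.any_eq_true, List.mem_cons, decide_eq_true_eq]
        exact ⟨x, Or.inr hx, h4⟩
    rw [if_pos hany]
  · rw [if_neg h]
    have hno : ¬ ((y :: ys).any (fun x => decide (4 ≤ f x)) = true) := by
      intro hany
      apply h
      rw [foldl_max_ge_iff]
      rcases List.any_eq_true.mp hany with ⟨x, hx, hfx⟩
      rcases List.mem_cons.mp hx with rfl | hx'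
      · exact Or.inl (of_decide_eq_true hfx)
      · exact Or.inr ⟨f x, List.mem_map_of_mem hx', of_decide_eq_true hfx⟩
    rw [if_neg hno]

lemma main_eq (A : String) (alts : List String) (d : String)
    (h1 : A ≠ ".") (h2 : alts ≠ []) (h3 : d = "upstream" ∨ d = "downstream") :
    homopolymer_function A alts d = homopolymer_function_alt A alts d := by
  obtain ⟨y, ys, rfl⟩ := List.exists_cons_of_ne_nil h2
  have hds : ¬ (("downstream" : String) = "upstream") := by decide
  rcases h3 with rfl | rfl
  · simp only [homopolymer_function, homopolymer_function_alt, goSeqsB_eq]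
    rw [if_pos h1, if_neg h1]
    simp only [ite_true, List.map_cons, List.any_cons, List.any_map,
      PySem.List.max?_id_cons, Option.getD_some, ge_iff_le, longestRun_eq]
    exact max_ite_eq (fun x => longestRunB (A.toList ++ x.toList)) y ys
  · simp only [homopolymer_function, homopolymer_function_alt, goSeqsB_eq]
    rw [if_pos h1, if_neg h1]
    simp only [hds, ite_false, ite_true, List.map_cons, List.any_cons, List.any_map,
      PySem.List.max?_id_cons, Option.getD_some, ge_iff_le, longestRun_eq]
    exact max_ite_eq (fun x => longestRunB (x.toList ++ A.toList)) y ys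

-- ===== VERDICT (by name: the statement is the Claim_ definition above) =====
theorem homopolymer_function_spec : Claim_equal_homopolymer_function := by
  intro A alts d _ hpre
  unfold Spec_homopolymer_function
  by_cases hA : A = "."
  · subst hA; simp [homopolymer_function, homopolymer_function_alt]
  · rcases hpre with h | ⟨h2, h3⟩
    · exact absurd h hA
    · exact main_eq A alts d hA h2 h3
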